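-- pv_equiv track=rewrite | github.com/SsyHow/Codeforces2 | 1685a/main.py | check
-- ===== SOURCE A (Python) =====
-- def check(arr):
--     n = len(arr)
--     for i in range(n):
--         left = arr[i - 1]
--         right = arr[(i + 1) % n]
--         if not ((arr[i] > left and arr[i] > right) or (arr[i] < left and arr[i] < right)):
--             return False
--     return True
-- ===== SOURCE B (Python) =====
-- def check(arr):
--     n = len(arr)
--     if n == 0:
--         return True
--     if n % 2:
--         # a cycle of odd length cannot strictly alternate
--         return False
--     evens = range(0, n, 2)
--     # alternation forces all even positions to be the same kind of extremum,
--     # and valleys (or peaks) at all even positions force peaks (valleys) at odd ones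
--     if all(arr[i] < arr[i - 1] and arr[i] < arr[i + 1] for i in evens):
--         return True
--     return all(arr[i] > arr[i - 1] and arr[i] > arr[i + 1] for i in evens)
-- ===== Notes on version B (the rewrite author's own statement) =====
-- stated objective: alternative
-- what changed: B replaces A's per-element three-way local-extremum scan with a parity argument: odd-length arrays are rejected outright, and for even length it only inspects the n/2 even positions, testing whether they are all strict valleys or all strict peaks (alternation makes the odd positions automatic).
import Mathlib
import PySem

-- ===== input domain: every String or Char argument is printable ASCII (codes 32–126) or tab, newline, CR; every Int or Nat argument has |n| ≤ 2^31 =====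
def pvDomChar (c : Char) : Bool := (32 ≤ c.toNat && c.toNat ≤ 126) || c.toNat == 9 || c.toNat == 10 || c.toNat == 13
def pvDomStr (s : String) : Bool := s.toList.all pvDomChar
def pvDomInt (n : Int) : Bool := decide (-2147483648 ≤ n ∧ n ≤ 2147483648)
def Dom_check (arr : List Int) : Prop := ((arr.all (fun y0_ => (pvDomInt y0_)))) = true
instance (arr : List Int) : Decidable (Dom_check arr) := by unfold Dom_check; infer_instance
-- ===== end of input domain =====

-- B replaces A's per-element local-extremum scan by a parity argument: odd lengths are
-- rejected outright, and for even length only the even positions are tested (all strict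
-- valleys, or all strict peaks); same O(n) cost (objective: alternative).

-- ===== PORT A =====
-- all indices A uses are in range whenever the loop body runs (0 ≤ i < n), so pyGetD's
-- default 0 is never taken
def checkLoop (arr : List Int) (n : Int) : List Int → Bool
  | [] => true
  | i :: rest =>
    let left := PySem.List.pyGetD arr (i - 1) 0
    let right := PySem.List.pyGetD arr (PySem.Int.mod (i + 1) n) 0
    let ai := PySem.List.pyGetD arr i 0
    if ((ai > left && ai > right) || (ai < left && ai < right)) then
      checkLoop arr n rest
    else false

def check (arr : List Int) : Bool :=
  let n : Int := arr.length
  checkLoop arr n (PySem.List.pyRange 0 n 1)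

-- ===== PORT B =====
def check_alt (arr : List Int) : Bool :=
  let n : Int := arr.length
  if n == 0 then true
  else if PySem.Int.mod n 2 != 0 then false
  else
    let evens := PySem.List.pyRange 0 n 2
    if evens.all (fun i => PySem.List.pyGetD arr i 0 < PySem.List.pyGetD arr (i - 1) 0
        && PySem.List.pyGetD arr i 0 < PySem.List.pyGetD arr (i + 1) 0) then true
    else evens.all (fun i => PySem.List.pyGetD arr i 0 > PySem.List.pyGetD arr (i - 1) 0
        && PySem.List.pyGetD arr i 0 > PySem.List.pyGetD arr (i + 1) 0)

-- ===== PRECONDITION & SPEC =====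
def Spec_check (arr : List Int) (out : Bool) : Prop := out = check_alt arr
instance (arr : List Int) (out : Bool) : Decidable (Spec_check arr out) := by unfold Spec_check; infer_instance

-- ===== CLAIM (what is proved, stated in full; the proofs are below) =====
def Claim_equal_check : Prop := ∀ (arr : List Int), Dom_check arr → Spec_check arr (check arr)

-- ===== LEMMAS AND PROOFS =====

-- circular successor / predecessor on {0, …, n-1}
def nxt (n i : Nat) : Nat := if i + 1 = n then 0 else i + 1
def prv (n i : Nat) : Nat := if i = 0 then n - 1 else i - 1

-- comparison sign of a i against its circular successor
def sgn (a : Nat → Int) (n i : Nat) : Int :=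
  if a i < a (nxt n i) then 1 else if a (nxt n i) < a i then -1 else 0

def pvExt (a : Nat → Int) (n j : Nat) : Prop :=
  (a (prv n j) < a j ∧ a (nxt n j) < a j) ∨ (a j < a (prv n j) ∧ a j < a (nxt n j))

def pvIsMin (a : Nat → Int) (n j : Nat) : Prop := a j < a (prv n j) ∧ a j < a (nxt n j)
def pvIsMax (a : Nat → Int) (n j : Nat) : Prop := a (prv n j) < a j ∧ a (nxt n j) < a j

lemma nxt_prv (n j : Nat) (hn : 0 < n) (hj : j < n) : nxt n (prv n j) = j := by
  by_cases h : j = 0 <;> simp [nxt, prv, h] <;> (try split_ifs) <;> omega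

lemma prv_nxt (n i : Nat) (hn : 0 < n) (hi : i < n) : prv n (nxt n i) = i := by
  by_cases h : i + 1 = n <;> simp [nxt, prv, h] <;> (try split_ifs) <;> omega

lemma sgn_eq_one (a : Nat → Int) (n i : Nat) : sgn a n i = 1 ↔ a i < a (nxt n i) := by
  simp only [sgn]; split_ifs <;> simp <;> omega

lemma sgn_eq_negone (a : Nat → Int) (n i : Nat) : sgn a n i = -1 ↔ a (nxt n i) < a i := by
  simp only [sgn]; split_ifs <;> simp <;> omega

lemma nxt_lt (n i : Nat) (hn : 0 < n) (hi : i < n) : nxt n i < n := by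
  unfold nxt; split_ifs <;> omega

lemma prv_lt (n j : Nat) (hn : 0 < n) (hj : j < n) : prv n j < n := by
  unfold prv; split_ifs <;> omega

lemma ext_iff_sgn (a : Nat → Int) (n j : Nat) (hn : 0 < n) (hj : j < n) :
    pvExt a n j ↔ (sgn a n (prv n j) = 1 ∧ sgn a n j = -1) ∨
                (sgn a n (prv n j) = -1 ∧ sgn a n j = 1) := by
  rw [sgn_eq_one, sgn_eq_negone, sgn_eq_one, sgn_eq_negone, nxt_prv n j hn hj]
  unfold pvExt
  constructor <;> intro h <;> omega

lemma min_iff_sgn (a : Nat → Int) (n j : Nat) (hn : 0 < n) (hj : j < n) :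
    pvIsMin a n j ↔ (sgn a n (prv n j) = -1 ∧ sgn a n j = 1) := by
  rw [sgn_eq_negone, sgn_eq_one, nxt_prv n j hn hj]
  unfold pvIsMin
  constructor <;> intro h <;> omega

-- step relation extracted from "every element is a strict extremum"
lemma step_of_ext (a : Nat → Int) (n : Nat) (hn : 0 < n)
    (H : ∀ j < n, pvExt a n j) :
    ∀ i < n, sgn a n (nxt n i) = -sgn a n i ∧ sgn a n i ≠ 0 := by
  intro i hi
  have hj := H (nxt n i) (nxt_lt n i hn hi)
  rw [ext_iff_sgn a n (nxt n i) hn (nxt_lt n i hn hi), prv_nxt n i hn hi] at hj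
  rcases hj with ⟨h1, h2⟩ | ⟨h1, h2⟩ <;> constructor <;> omega

-- alternation along the linear part of the cycle
lemma sgn_alt (a : Nat → Int) (n : Nat) (hn : 0 < n)
    (H : ∀ i < n, sgn a n (nxt n i) = -sgn a n i ∧ sgn a n i ≠ 0) :
    ∀ i < n, sgn a n i = if i % 2 = 0 then sgn a n 0 else -sgn a n 0 := by
  intro i
  induction i with
  | zero => intro _; simp
  | succ k ih =>
    intro hk
    have hk' : k < n := by omega
    have hs := (H k hk').1
    have hnx : nxt n k = k + 1 := by unfold nxt; split_ifs <;> omega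
    rw [hnx] at hs
    rw [hs, ih hk']
    rcases Nat.even_or_odd k with he | ho
    · have h1 : k % 2 = 0 := Nat.even_iff.mp he
      have h2 : (k + 1) % 2 = 1 := by omega
      simp [h1, h2]
    · have h1 : k % 2 = 1 := Nat.odd_iff.mp ho
      have h2 : (k + 1) % 2 = 0 := by omega
      simp [h1, h2]

lemma even_of_ext (a : Nat → Int) (n : Nat) (hn : 0 < n)
    (H : ∀ j < n, pvExt a n j) : n % 2 = 0 := by
  have hstep := step_of_ext a n hn H
  have halt := sgn_alt a n hn hstep
  by_contra hodd
  have hlast : n - 1 < n := by omega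
  have hwrap := (hstep (n - 1) hlast).1
  have hnx : nxt n (n - 1) = 0 := by unfold nxt; split_ifs <;> omega
  rw [hnx] at hwrap
  have hpar : (n - 1) % 2 = 0 := by omega
  have := halt (n - 1) hlast
  rw [hpar] at this
  simp at this
  have h0 := (hstep 0 hn).2
  omega

-- negation swaps min and max, preserves pvExt and flips sgn
lemma sgn_neg (a : Nat → Int) (n i : Nat) :
    sgn (fun k => -a k) n i = -sgn a n i := by
  simp only [sgn]; split_ifs <;> omega

lemma ext_neg (a : Nat → Int) (n j : Nat) :
    pvExt (fun k => -a k) n j ↔ pvExt a n j := by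
  simp only [pvExt]; constructor <;> intro h <;> omega

lemma min_neg (a : Nat → Int) (n j : Nat) :
    pvIsMin (fun k => -a k) n j ↔ pvIsMax a n j := by
  simp only [pvIsMin, pvIsMax]; constructor <;> intro h <;> omega

-- forward, the valley case: if all elements are extrema and the first step goes up,
-- every even position is a strict valley
lemma forward_min (a : Nat → Int) (n : Nat) (hn : 0 < n)
    (H : ∀ j < n, pvExt a n j) (hev : n % 2 = 0) (h0 : sgn a n 0 = 1) :
    ∀ j < n, j % 2 = 0 → pvIsMin a n j := by
  have hstep := step_of_ext a n hn H
  have halt := sgn_alt a n hn hstep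
  intro j hj hje
  rw [min_iff_sgn a n j hn hj]
  have hjv := halt j hj
  rw [hje] at hjv; simp at hjv
  have hp : prv n j < n := prv_lt n j hn hj
  have hpv := halt (prv n j) hp
  have hpodd : (prv n j) % 2 = 1 := by unfold prv; split_ifs <;> omega
  rw [hpodd] at hpv; simp at hpv
  omega

lemma backward_min (a : Nat → Int) (n : Nat) (hn : 0 < n) (hev : n % 2 = 0)
    (H : ∀ j < n, j % 2 = 0 → pvIsMin a n j) :
    ∀ j < n, pvExt a n j := by
  intro j hj
  rcases Nat.even_or_odd j with he | ho
  · -- even position: a valley is an extremum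
    have := H j hj (Nat.even_iff.mp he)
    exact Or.inr this
  · -- odd position: both neighbours are even valleys, so j is a peak
    have hjo : j % 2 = 1 := Nat.odd_iff.mp ho
    left
    constructor
    · -- a (prv n j) < a j : prv n j = j - 1 is even, its valley bound at nxt is a j
      have hp : prv n j = j - 1 := by unfold prv; split_ifs <;> omega
      have h1 : j - 1 < n := by omega
      have hm := (H (j - 1) h1 (by omega)).2
      have hx : nxt n (j - 1) = j := by unfold nxt; split_ifs <;> omega
      rw [hx] at hm
      rw [hp]; exact hm
    · -- a (nxt n j) < a j : nxt n j is even, its valley bound at prv is a j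
      have h1 : nxt n j < n := nxt_lt n j hn hj
      have h2 : (nxt n j) % 2 = 0 := by unfold nxt; split_ifs <;> omega
      have hm := (H (nxt n j) h1 h2).1
      rw [prv_nxt n j hn hj] at hm
      exact hm

-- the combinatorial core: for nonempty arr, A's condition ⟺ B's condition
lemma core (a : Nat → Int) (n : Nat) (hn : 0 < n) :
    (∀ j < n, pvExt a n j) ↔
    (n % 2 = 0 ∧ ((∀ j < n, j % 2 = 0 → pvIsMin a n j) ∨ (∀ j < n, j % 2 = 0 → pvIsMax a n j))) := by
  constructor
  · intro H
    have hev := even_of_ext a n hn H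
    refine ⟨hev, ?_⟩
    have h0 := (step_of_ext a n hn H 0 hn).2
    unfold sgn at h0
    by_cases hc : a 0 < a (nxt n 0)
    · left
      exact forward_min a n hn H hev (by unfold sgn; simp [hc])
    · right
      have hc2 : a (nxt n 0) < a 0 := by
        by_contra hc2
        simp [hc, hc2] at h0
      intro j hj hje
      rw [← min_neg]
      refine forward_min (fun k => -a k) n hn ?_ hev ?_ j hj hje
      · intro j' hj'; rw [ext_neg]; exact H j' hj'
      · rw [sgn_neg]
        unfold sgn
        simp [hc, hc2]
  · rintro ⟨hev, H | H⟩
    · exact backward_min a n hn hev H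
    · intro j hj
      rw [← ext_neg]
      refine backward_min (fun k => -a k) n hn hev ?_ j hj
      intro j' hj' hje
      rw [min_neg]
      exact H j' hj' hje

-- ---- bridges between the ports and the abstract statements ----

lemma if_then_rest (c x : Bool) : (if c = true then x else false) = (c && x) := by
  cases c <;> simp

lemma checkLoop_eq_all (arr : List Int) (n : Int) (l : List Int) :
    checkLoop arr n l = l.all (fun i =>
      let left := PySem.List.pyGetD arr (i - 1) 0
      let right := PySem.List.pyGetD arr (PySem.Int.mod (i + 1) n) 0
      let ai := PySem.List.pyGetD arr i 0
      ((ai > left && ai > right) || (ai < left && ai < right))) := by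
  induction l with
  | nil => rfl
  | cons i rest ih =>
    simp only [checkLoop, List.all_cons, ih, if_then_rest]

-- arr[i-1] for 0 ≤ i < n is the circular predecessor
lemma left_eq (arr : List Int) (j : Nat) (hj : j < arr.length) :
    PySem.List.pyGetD arr ((j : Int) - 1) 0 = arr.getD (prv arr.length j) 0 := by
  rcases Nat.eq_zero_or_pos j with h0 | hpos
  · subst h0
    have h1 : ((0 : Nat) : Int) - 1 = -1 := by omega
    rw [h1, PySem.List.pyGetD_neg_ofNat arr 1 0 (by omega) (by omega)]
    have : prv arr.length 0 = arr.length - 1 := by unfold prv; simp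
    rw [this, List.getD_eq_getElem _ _ (by omega)]
  · have h1 : ((j : Int) - 1) = ((j - 1 : Nat) : Int) := by omega
    rw [h1, PySem.List.pyGetD_natCast]
    have : prv arr.length j = j - 1 := by unfold prv; split_ifs <;> omega
    rw [this]

-- arr[(i+1) % n] for 0 ≤ i < n is the circular successor
lemma right_eq (arr : List Int) (j : Nat) (hj : j < arr.length) :
    PySem.List.pyGetD arr (PySem.Int.mod ((j : Int) + 1) (arr.length : Int)) 0
      = arr.getD (nxt arr.length j) 0 := by
  rw [PySem.Int.mod_eq_emod_of_pos (by omega)]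
  by_cases hc : j + 1 = arr.length
  · have h1 : ((j : Int) + 1) = (arr.length : Int) := by omega
    rw [h1, Int.emod_self, PySem.List.pyGetD_zero]
    have : nxt arr.length j = 0 := by unfold nxt; simp [hc]
    rw [this]
  · have h1 : ((j : Int) + 1) % (arr.length : Int) = ((j + 1 : Nat) : Int) := by
      rw [Int.emod_eq_of_lt (by omega) (by omega)]; omega
    rw [h1, PySem.List.pyGetD_natCast]
    have : nxt arr.length j = j + 1 := by unfold nxt; simp [hc]
    rw [this]

-- arr[i+1] for an even 0 ≤ i < n with n even never wraps
lemma right_eq' (arr : List Int) (j : Nat) (hj : j + 1 < arr.length) :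
    PySem.List.pyGetD arr ((j : Int) + 1) 0 = arr.getD (nxt arr.length j) 0 := by
  have h1 : ((j : Int) + 1) = ((j + 1 : Nat) : Int) := by omega
  rw [h1, PySem.List.pyGetD_natCast]
  have : nxt arr.length j = j + 1 := by unfold nxt; split_ifs <;> omega
  rw [this]

lemma check_iff (arr : List Int) (hne : 0 < arr.length) :
    check arr = true ↔ ∀ j < arr.length, pvExt (fun k => arr.getD k 0) arr.length j := by
  unfold check
  rw [checkLoop_eq_all, List.all_eq_true]
  constructor
  · intro H j hj
    have hm : (j : Int) ∈ PySem.List.pyRange 0 (arr.length : Int) 1 := by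
      rw [PySem.List.mem_pyRange_one]; omega
    have := H _ hm
    simp only [left_eq arr j hj, right_eq arr j hj, PySem.List.pyGetD_natCast,
      Bool.or_eq_true, Bool.and_eq_true, decide_eq_true_iff] at this
    unfold pvExt
    rcases this with ⟨h1, h2⟩ | ⟨h1, h2⟩
    · exact Or.inl ⟨h1, h2⟩
    · exact Or.inr ⟨h1, h2⟩
  · intro H i hm
    rw [PySem.List.mem_pyRange_one] at hm
    obtain ⟨h0, h1⟩ := hm
    have hj : i.toNat < arr.length := by omega
    have hi : i = ((i.toNat : Nat) : Int) := by omega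
    rw [hi]
    have := H i.toNat hj
    unfold pvExt at this
    simp only [left_eq arr i.toNat hj, right_eq arr i.toNat hj, PySem.List.pyGetD_natCast,
      Bool.or_eq_true, Bool.and_eq_true, decide_eq_true_iff]
    rcases this with ⟨hh1, hh2⟩ | ⟨hh1, hh2⟩
    · exact Or.inl ⟨hh1, hh2⟩
    · exact Or.inr ⟨hh1, hh2⟩

-- B's pass over range(0, n, 2): body holds at every even index
lemma alt_pass_iff (arr : List Int) (hne : 0 < arr.length) (hev : arr.length % 2 = 0)
    (P : Int → Int → Prop) [∀ x y, Decidable (P x y)] :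
    ((PySem.List.pyRange 0 (arr.length : Int) 2).all (fun i =>
        (decide (P (PySem.List.pyGetD arr i 0) (PySem.List.pyGetD arr (i - 1) 0))
          && decide (P (PySem.List.pyGetD arr i 0) (PySem.List.pyGetD arr (i + 1) 0)))) = true)
      ↔ ∀ j < arr.length, j % 2 = 0 →
          (P (arr.getD j 0) (arr.getD (prv arr.length j) 0)
            ∧ P (arr.getD j 0) (arr.getD (nxt arr.length j) 0)) := by
  rw [List.all_eq_true]
  constructor
  · intro H j hj hje
    have hm : (j : Int) ∈ PySem.List.pyRange 0 (arr.length : Int) 2 := by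
      rw [PySem.List.mem_pyRange_iff_of_pos (by omega)]
      refine ⟨by omega, by omega, ?_⟩
      have : (2 : Int) ∣ (j : Int) := by
        rcases Nat.even_iff.mpr hje with ⟨k, hk⟩
        exact ⟨(k : Int), by omega⟩
      simpa using this
    have := H _ hm
    rw [left_eq arr j hj, right_eq' arr j (by omega), PySem.List.pyGetD_natCast] at this
    simp only [Bool.and_eq_true, decide_eq_true_iff] at this
    exact this
  · intro H i hm
    rw [PySem.List.mem_pyRange_iff_of_pos (by omega)] at hm
    obtain ⟨h0, h1, h2⟩ := hm
    have hj : i.toNat < arr.length := by omega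
    have hje : i.toNat % 2 = 0 := by omega
    have hi : i = ((i.toNat : Nat) : Int) := by omega
    rw [hi, left_eq arr i.toNat hj, right_eq' arr i.toNat (by omega), PySem.List.pyGetD_natCast]
    simp only [Bool.and_eq_true, decide_eq_true_iff]
    exact H i.toNat hj hje

lemma alt_iff (arr : List Int) (hne : 0 < arr.length) (hev : arr.length % 2 = 0) :
    check_alt arr = true ↔
      ((∀ j < arr.length, j % 2 = 0 → pvIsMin (fun k => arr.getD k 0) arr.length j) ∨
       (∀ j < arr.length, j % 2 = 0 → pvIsMax (fun k => arr.getD k 0) arr.length j)) := by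
  have hn0 : ((arr.length : Int) == 0) = false := by rw [beq_eq_false_iff_ne]; omega
  have hmod : PySem.Int.mod (arr.length : Int) 2 = 0 := by
    rw [PySem.Int.mod_eq_emod_of_pos (by omega)]
    omega
  have hminP := alt_pass_iff arr hne hev (fun x y => x < y)
  have hmaxP := alt_pass_iff arr hne hev (fun x y => x > y)
  simp only at hminP hmaxP
  simp only [check_alt]
  rw [hn0]
  simp only [Bool.false_eq_true, if_false, hmod, bne_self_eq_false]
  constructor
  · intro h
    by_cases hc : ((PySem.List.pyRange 0 (arr.length : Int) 2).all (fun i =>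
        decide (PySem.List.pyGetD arr i 0 < PySem.List.pyGetD arr (i - 1) 0)
          && decide (PySem.List.pyGetD arr i 0 < PySem.List.pyGetD arr (i + 1) 0))) = true
    · exact Or.inl (fun j hj hje => hminP.mp hc j hj hje)
    · rw [if_neg hc] at h
      exact Or.inr (fun j hj hje => hmaxP.mp h j hj hje)
  · rintro (H | H)
    · rw [if_pos (hminP.mpr (fun j hj hje => H j hj hje))]
    · by_cases hc : ((PySem.List.pyRange 0 (arr.length : Int) 2).all (fun i =>
        decide (PySem.List.pyGetD arr i 0 < PySem.List.pyGetD arr (i - 1) 0)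
          && decide (PySem.List.pyGetD arr i 0 < PySem.List.pyGetD arr (i + 1) 0))) = true
      · rw [if_pos hc]
      · rw [if_neg hc]
        exact hmaxP.mpr (fun j hj hje => H j hj hje)

-- ===== VERDICT (by name: the statement is the Claim_ definition above) =====
theorem check_spec : Claim_equal_check := by
  intro arr _
  unfold Spec_check
  rcases Nat.eq_zero_or_pos arr.length with h0 | hpos
  · have harr : arr = [] := List.eq_nil_of_length_eq_zero h0
    subst harr
    rfl
  · rw [Bool.eq_iff_iff, check_iff arr hpos]
    rw [core (fun k => arr.getD k 0) arr.length hpos]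
    constructor
    · rintro ⟨hev, H⟩
      exact (alt_iff arr hpos hev).mpr H
    · intro h
      -- B returns true only when n is even (mod test) and one pass succeeded
      have hev : arr.length % 2 = 0 := by
        by_contra hodd
        simp only [check_alt] at h
        have hn0 : ((arr.length : Int) == 0) = false := by rw [beq_eq_false_iff_ne]; omega
        rw [hn0] at h
        simp at h
        omega
      exact ⟨hev, (alt_iff arr hpos hev).mp h⟩
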